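-- pv_equiv track=rewrite | github.com/OH-Neuri/Algorithm-Solving | 프로그래머스/2/147354. 테이블 해시 함수/테이블 해시 함수.py | solution
-- ===== SOURCE A (Python) =====
-- from collections import Counter
--
-- def solution(data, col, row_begin, row_end):
--     sum_xor = 0
--     data.sort(key=lambda x:(x[col-1],-x[0]))
--
--     mod_counter = Counter()
--     for i in range(row_begin-1, row_end):
--         row_mod = 0
--         for c in range(len(data[0])):
--             row_mod += data[i][c] % (i+1)
--         mod_counter[row_mod] += 1
--
--     for mod_val, count in mod_counter.items():
--         if count % 2 != 0:
--             sum_xor ^= mod_val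
--
--     return sum_xor
-- ===== SOURCE B (Python) =====
-- def solution(data, col, row_begin, row_end):
--     data.sort(key=lambda x: (x[col-1], -x[0]))
--
--     def go(i):
--         if i >= row_end:
--             return 0
--         return go(i + 1) ^ sum(data[i][c] % (i + 1) for c in range(len(data[0])))
--
--     return go(row_begin - 1)
-- ===== Notes on version B (the rewrite author's own statement) =====
-- stated objective: alternative
-- what changed: Drops A's Counter frequency table and its second parity-scan pass entirely: B recurses over the row range, computing each row's mod value as a generator sum and XOR-ing it back-to-front into the result (values occurring an even number of times self-cancel).
-- outside the precondition, e.g. on solution([[1], [2, 3]], 1, 1, 2): A returns 0, B returns 0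
import Mathlib
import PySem

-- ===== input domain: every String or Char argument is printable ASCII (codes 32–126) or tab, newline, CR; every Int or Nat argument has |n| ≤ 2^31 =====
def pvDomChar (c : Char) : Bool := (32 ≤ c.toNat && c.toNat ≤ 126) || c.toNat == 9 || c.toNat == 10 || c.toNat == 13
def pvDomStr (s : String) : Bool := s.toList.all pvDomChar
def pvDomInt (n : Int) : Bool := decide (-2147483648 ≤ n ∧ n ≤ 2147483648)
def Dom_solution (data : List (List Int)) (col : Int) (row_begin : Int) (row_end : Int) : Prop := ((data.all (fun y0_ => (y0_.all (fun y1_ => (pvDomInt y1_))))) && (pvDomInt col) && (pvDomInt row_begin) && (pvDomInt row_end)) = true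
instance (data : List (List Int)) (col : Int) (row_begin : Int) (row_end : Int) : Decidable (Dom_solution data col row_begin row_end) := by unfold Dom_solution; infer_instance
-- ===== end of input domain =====

-- B drops A's Counter table and second parity pass: it recurses over the row range, XOR-ing each
-- row's generator-sum of mods back-to-front (even multiplicities self-cancel). Same cost as A.
-- Both A and B sort `data` in place in Python; the equivalence proved here is about the return value.

-- ===== PORT A =====
-- shared one-liner: data.sort(key=lambda x:(x[col-1],-x[0])) — the identical sort line of A and B
def pvSorted (data : List (List Int)) (col : Int) : List (List Int) :=
  PySem.List.sorted2 data (fun x => PySem.List.pyGetD x (col - 1) 0) (fun x => -(PySem.List.pyGetD x 0 0))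

def solution (data : List (List Int)) (col : Int) (row_begin : Int) (row_end : Int) : Int :=
  let d := pvSorted data col
  let mod_counter : PySem.Dict Int Int :=
    (PySem.List.pyRange (row_begin - 1) row_end 1).foldl
      (fun m i =>
        let row_mod :=
          (PySem.List.pyRange 0 ((PySem.List.pyGetD d 0 []).length : Int) 1).foldl
            (fun row_mod c => row_mod + PySem.Int.mod (PySem.List.pyGetD (PySem.List.pyGetD d i []) c 0) (i + 1)) 0
        m.modify row_mod 0 (fun v => v + 1)) PySem.Dict.empty
  mod_counter.items.foldl
    (fun sum_xor p => if PySem.Int.mod p.2 2 ≠ 0 then PySem.Int.bxor sum_xor p.1 else sum_xor) 0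

-- ===== PORT B =====
-- sum(data[i][c] % (i+1) for c in range(len(data[0]))) — a generator sum, ported as map-then-sum
def pvRowSum (d : List (List Int)) (i : Int) : Int :=
  ((PySem.List.pyRange 0 ((PySem.List.pyGetD d 0 []).length : Int) 1).map
    (fun c => PySem.Int.mod (PySem.List.pyGetD (PySem.List.pyGetD d i []) c 0) (i + 1))).sum

-- the inner recursive function go(i) of B
def pvGo (d : List (List Int)) (row_end i : Int) : Int :=
  if i ≥ row_end then 0
  else PySem.Int.bxor (pvGo d row_end (i + 1)) (pvRowSum d i)
termination_by (row_end - i).toNat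
decreasing_by omega

def solution_alt (data : List (List Int)) (col : Int) (row_begin : Int) (row_end : Int) : Int :=
  let d := pvSorted data col
  pvGo d row_end (row_begin - 1)

-- ===== PRECONDITION & SPEC =====
-- Pre_ = where A returns: the sort key needs col-1 and 0 to be valid (possibly negative) indexes in
-- every row, and a nonempty row loop needs every i in range(row_begin-1, row_end) to be a valid row
-- index with i+1 ≠ 0 (else ZeroDivisionError).  It also excludes ragged tables when the row loop is
-- nonempty: there, whether A raises or returns depends on which row the sort happens to put first.
def Pre_solution (data : List (List Int)) (col : Int) (row_begin : Int) (row_end : Int) : Prop :=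
  (∀ row ∈ data, PySem.Raise.InRange row.length (col - 1) ∧ row ≠ []) ∧
  (row_begin - 1 < row_end →
    (∀ row ∈ data, row.length = data.headI.length) ∧
    ¬(row_begin - 1 ≤ -1 ∧ -1 < row_end) ∧
    -(data.length : Int) ≤ row_begin - 1 ∧ row_end ≤ (data.length : Int))
instance (data : List (List Int)) (col : Int) (row_begin : Int) (row_end : Int) : Decidable (Pre_solution data col row_begin row_end) := by unfold Pre_solution; infer_instance

def pvWitness_solution : List (List Int) × Int × Int × Int := ([[1, 2], [3, 4]], 1, 1, 2)

def Spec_solution (data : List (List Int)) (col : Int) (row_begin : Int) (row_end : Int) (out : Int) : Prop := out = solution_alt data col row_begin row_end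
instance (data : List (List Int)) (col : Int) (row_begin : Int) (row_end : Int) (out : Int) : Decidable (Spec_solution data col row_begin row_end out) := by unfold Spec_solution; infer_instance

-- ===== CLAIM (what is proved, stated in full; the proofs are below) =====
def Claim_equal_solution : Prop := ∀ (data : List (List Int)) (col : Int) (row_begin : Int) (row_end : Int), Dom_solution data col row_begin row_end → Pre_solution data col row_begin row_end → Spec_solution data col row_begin row_end (solution data col row_begin row_end)

-- ===== LEMMAS AND PROOFS =====

theorem pv_bxor_assoc (a b c : Int) : PySem.Int.bxor (PySem.Int.bxor a b) c = PySem.Int.bxor a (PySem.Int.bxor b c) := by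
  unfold PySem.Int.bxor
  rcases le_or_gt 0 a with ha | ha <;> rcases le_or_gt 0 b with hb | hb <;> rcases le_or_gt 0 c with hc | hc <;>
    simp only [ha, hb, hc, if_pos, if_neg, not_le.mpr, Int.natCast_nonneg, ite_true, ite_false,
      show ∀ n : Nat, ¬(0 : Int) ≤ -↑n - 1 by intro n; omega,
      show ∀ n : Nat, (0 : Int) ≤ ↑n by intro n; omega] <;>
    simp only [show ∀ n : Nat, -(-(n : Int) - 1) - 1 = (n : Int) by intro n; omega, Int.toNat_natCast,
      Nat.xor_assoc]

theorem pv_bxor_zero_left (x : Int) : PySem.Int.bxor 0 x = x := by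
  rw [PySem.Int.bxor_comm, PySem.Int.bxor_zero]

theorem pv_mod_two_natCast (c : Nat) : PySem.Int.mod ((c : Nat) : Int) 2 = ((c % 2 : Nat) : Int) := by
  simpa using PySem.Int.mod_natCast c 2

-- A's inner loop, named for the proofs (row_mod of row i of table d)
def pvRowMod (d : List (List Int)) (i : Int) : Int :=
  (PySem.List.pyRange 0 ((PySem.List.pyGetD d 0 []).length : Int) 1).foldl
    (fun row_mod c => row_mod + PySem.Int.mod (PySem.List.pyGetD (PySem.List.pyGetD d i []) c 0) (i + 1)) 0

-- B's generator sum equals A's accumulating inner loop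
theorem pv_rowSum_eq_rowMod (d : List (List Int)) (i : Int) :
    pvRowSum d i = pvRowMod d i := by
  unfold pvRowSum pvRowMod
  rw [PySem.List.foldl_add]
  simp

-- the running XOR of a list
def pvXorAll (l : List Int) : Int := l.foldl PySem.Int.bxor 0

theorem pv_foldl_bxor_init (l : List Int) (a : Int) :
    l.foldl PySem.Int.bxor a = PySem.Int.bxor a (pvXorAll l) := by
  induction l generalizing a with
  | nil => simp [pvXorAll, PySem.Int.bxor_zero]
  | cons x t ih =>
    show t.foldl PySem.Int.bxor (PySem.Int.bxor a x) = _
    have hc : pvXorAll (x :: t) = PySem.Int.bxor x (pvXorAll t) := by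
      show t.foldl PySem.Int.bxor (PySem.Int.bxor 0 x) = _
      rw [ih, pv_bxor_zero_left]
    rw [ih, hc, pv_bxor_assoc]

theorem pv_xorAll_cons (x : Int) (t : List Int) :
    pvXorAll (x :: t) = PySem.Int.bxor (pvXorAll t) x := by
  show t.foldl PySem.Int.bxor (PySem.Int.bxor 0 x) = _
  rw [pv_foldl_bxor_init, pv_bxor_zero_left, PySem.Int.bxor_comm]

-- B's recursion computes the running XOR of the row_mods over range(row_begin-1, row_end)
theorem pv_go_eq_xorAll (d : List (List Int)) (row_end : Int) (n : Nat) :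
    ∀ i : Int, (row_end - i).toNat = n →
      pvGo d row_end i =
      pvXorAll ((PySem.List.pyRange i row_end 1).map (pvRowMod d)) := by
  induction n with
  | zero =>
    intro i hi
    have hge : i ≥ row_end := by omega
    rw [pvGo, if_pos hge, PySem.List.pyRange_one_eq_nil hge]
    rfl
  | succ m ih =>
    intro i hi
    have hlt : i < row_end := by omega
    rw [pvGo, if_neg (by omega), pv_rowSum_eq_rowMod, ih (i + 1) (by omega),
      PySem.List.pyRange_one_cons hlt, List.map_cons, pv_xorAll_cons]

-- the "xor if P" loop body
def pvStep (P : Int → Prop) [DecidablePred P] (acc k : Int) : Int :=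
  if P k then PySem.Int.bxor acc k else acc

theorem pvStep_congr (P Q : Int → Prop) [DecidablePred P] [DecidablePred Q] (k : Int)
    (hk : P k ↔ Q k) (a : Int) : pvStep P a k = pvStep Q a k := by
  unfold pvStep
  split_ifs with hp hq hq
  · rfl
  · exact absurd (hk.mp hp) hq
  · exact absurd (hk.mpr hq) hp
  · rfl

theorem pvStep_rcomm (P : Int → Prop) [DecidablePred P] (a x y : Int) :
    pvStep P (pvStep P a x) y = pvStep P (pvStep P a y) x := by
  unfold pvStep
  split_ifs <;> try rfl
  rw [pv_bxor_assoc, pv_bxor_assoc, PySem.Int.bxor_comm x y]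

-- pulling an xored-in value out of the accumulator
theorem pv_foldl_step_bxor (P : Int → Prop) [DecidablePred P] (s : List Int) (a x : Int) :
    s.foldl (pvStep P) (PySem.Int.bxor a x) = PySem.Int.bxor (s.foldl (pvStep P) a) x := by
  induction s generalizing a with
  | nil => rfl
  | cons y t ih =>
    simp only [List.foldl_cons]
    have h : pvStep P (PySem.Int.bxor a x) y = PySem.Int.bxor (pvStep P a y) x := by
      unfold pvStep
      split_ifs with h
      · rw [pv_bxor_assoc, pv_bxor_assoc, PySem.Int.bxor_comm x y]
      · rfl
    rw [h, ih]

-- flipping the predicate at one element x of a Nodup list xors x into the result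
theorem pv_foldl_step_flip (P Q : Int → Prop) [DecidablePred P] [DecidablePred Q] (x : Int)
    (s : List Int) (a : Int) (hx : x ∈ s) (hnd : s.Nodup)
    (hagree : ∀ k, k ≠ x → (P k ↔ Q k)) (hflip : P x ↔ ¬ Q x) :
    s.foldl (pvStep P) a = PySem.Int.bxor (s.foldl (pvStep Q) a) x := by
  induction s generalizing a with
  | nil => cases hx
  | cons y t ih =>
    rcases List.nodup_cons.mp hnd with ⟨hy, hndt⟩
    by_cases hyx : y = x
    · subst hyx
      simp only [List.foldl_cons]
      have hcongr : ∀ b : Int, t.foldl (pvStep P) b = t.foldl (pvStep Q) b := by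
        intro b
        refine PySem.List.foldl_congr_mem t (pvStep P) (pvStep Q) b ?_
        intro acc k hk
        exact pvStep_congr P Q k (hagree k (fun h => hy (h ▸ hk))) acc
      by_cases hq : Q y
      · have hp : ¬ P y := fun hp => (hflip.mp hp) hq
        rw [hcongr]
        have e1 : pvStep P a y = a := by unfold pvStep; rw [if_neg hp]
        have e2 : pvStep Q a y = PySem.Int.bxor a y := by unfold pvStep; rw [if_pos hq]
        rw [e1, e2, pv_foldl_step_bxor, pv_bxor_assoc, PySem.Int.bxor_self, PySem.Int.bxor_zero]
      · have hp : P y := hflip.mpr hq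
        rw [hcongr]
        have e1 : pvStep P a y = PySem.Int.bxor a y := by unfold pvStep; rw [if_pos hp]
        have e2 : pvStep Q a y = a := by unfold pvStep; rw [if_neg hq]
        rw [e1, e2, pv_foldl_step_bxor]
    · have hxt : x ∈ t := by
        cases List.mem_cons.mp hx with
        | inl h => exact absurd h.symm hyx
        | inr h => exact h
      simp only [List.foldl_cons]
      rw [pvStep_congr P Q y (hagree y hyx) a, ih (pvStep Q a y) hxt hndt]

-- MAIN LEMMA: fold of "xor values with odd count" over the distinct values = running xor of the list
theorem pv_oddfold_eq_xorAll (l : List Int) :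
    (PySem.Set.ofList l : List Int).foldl
      (pvStep (fun k => PySem.Int.mod ((l.count k : Nat) : Int) 2 ≠ 0)) 0 = pvXorAll l := by
  induction l with
  | nil => rfl
  | cons x t ih =>
    have hQP : ∀ k, k ≠ x →
        (PySem.Int.mod (((x :: t).count k : Nat) : Int) 2 ≠ 0 ↔
         PySem.Int.mod ((t.count k : Nat) : Int) 2 ≠ 0) := by
      intro k hk
      have hc : (x :: t).count k = t.count k := by
        rw [List.count_cons]; simp [Ne.symm hk]
      rw [hc]
    have hcx : (x :: t).count x = t.count x + 1 := by rw [List.count_cons]; simp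
    have hflip : PySem.Int.mod (((x :: t).count x : Nat) : Int) 2 ≠ 0 ↔
        ¬ PySem.Int.mod ((t.count x : Nat) : Int) 2 ≠ 0 := by
      rw [hcx, pv_mod_two_natCast, pv_mod_two_natCast]
      omega
    haveI hrc : RightCommutative (pvStep (fun k => PySem.Int.mod (((x :: t).count k : Nat) : Int) 2 ≠ 0)) :=
      ⟨fun a u v => pvStep_rcomm _ a u v⟩
    by_cases hxt : x ∈ t
    · have hperm : (PySem.Set.ofList (x :: t) : List Int).Perm (PySem.Set.ofList t : List Int) := by
        rw [List.perm_ext_iff_of_nodup (PySem.Set.nodup_ofList _) (PySem.Set.nodup_ofList _)]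
        intro a
        rw [PySem.Set.mem_ofList, PySem.Set.mem_ofList, List.mem_cons]
        constructor
        · rintro (rfl | h)
          · exact hxt
          · exact h
        · exact Or.inr
      rw [hperm.foldl_eq 0,
        pv_foldl_step_flip _ _ x _ 0 ((PySem.Set.mem_ofList t x).mpr hxt)
          (PySem.Set.nodup_ofList t) hQP hflip, ih, pv_xorAll_cons]
    · have hperm : (PySem.Set.ofList (x :: t) : List Int).Perm (x :: (PySem.Set.ofList t : List Int)) := by
        rw [List.perm_ext_iff_of_nodup (PySem.Set.nodup_ofList _)
          (List.nodup_cons.mpr ⟨fun h => hxt ((PySem.Set.mem_ofList t x).mp h), PySem.Set.nodup_ofList t⟩)]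
        intro a
        rw [PySem.Set.mem_ofList, List.mem_cons, List.mem_cons, PySem.Set.mem_ofList]
      rw [hperm.foldl_eq 0, List.foldl_cons]
      have hstep : pvStep (fun k => PySem.Int.mod (((x :: t).count k : Nat) : Int) 2 ≠ 0) 0 x =
          PySem.Int.bxor 0 x := by
        unfold pvStep
        rw [if_pos]
        show PySem.Int.mod (((x :: t).count x : Nat) : Int) 2 ≠ 0
        rw [hcx, List.count_eq_zero_of_not_mem hxt, pv_mod_two_natCast]
        simp
      rw [hstep]
      have hcongr : (PySem.Set.ofList t : List Int).foldl
          (pvStep (fun k => PySem.Int.mod (((x :: t).count k : Nat) : Int) 2 ≠ 0)) (PySem.Int.bxor 0 x) =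
          (PySem.Set.ofList t : List Int).foldl
          (pvStep (fun k => PySem.Int.mod ((t.count k : Nat) : Int) 2 ≠ 0)) (PySem.Int.bxor 0 x) := by
        refine PySem.List.foldl_congr_mem _ _ _ _ ?_
        intro acc k hk
        exact pvStep_congr _ _ k (hQP k (fun h => hxt (h ▸ (PySem.Set.mem_ofList t k).mp hk))) acc
      rw [hcongr, pv_foldl_step_bxor, ih, pv_xorAll_cons]

-- A's counter loop IS Counter(mods) for mods = the list of row_mods
theorem pv_cnt_eq_counter (d : List (List Int)) (r : List Int) :
    r.foldl (fun m i => m.modify (pvRowMod d i) 0 (fun v => v + 1)) PySem.Dict.empty =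
    PySem.Dict.counter (r.map (pvRowMod d)) := by
  rw [PySem.Dict.counter_eq_foldl, List.foldl_map]

-- pointwise: A = B (no hypothesis needed for the pure ports)
theorem pv_solution_eq (data : List (List Int)) (col : Int) (row_begin : Int) (row_end : Int) :
    solution data col row_begin row_end = solution_alt data col row_begin row_end := by
  simp only [solution, solution_alt]
  rw [show (fun (m : PySem.Dict Int Int) (i : Int) =>
        m.modify ((PySem.List.pyRange 0 ((PySem.List.pyGetD (pvSorted data col) 0 []).length : Int) 1).foldl
          (fun row_mod c => row_mod + PySem.Int.mod (PySem.List.pyGetD (PySem.List.pyGetD (pvSorted data col) i []) c 0) (i + 1)) 0)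
          0 (fun v => v + 1)) =
      (fun (m : PySem.Dict Int Int) (i : Int) => m.modify (pvRowMod (pvSorted data col) i) 0 (fun v => v + 1)) from rfl]
  rw [pv_cnt_eq_counter, PySem.Dict.items_counter, List.foldl_map]
  rw [show (fun (sum_xor : Int) (k : Int) =>
        if PySem.Int.mod ((((PySem.List.pyRange (row_begin - 1) row_end 1).map (pvRowMod (pvSorted data col))).count k : Nat) : Int) 2 ≠ 0
        then PySem.Int.bxor sum_xor k else sum_xor) =
      pvStep (fun k => PySem.Int.mod ((((PySem.List.pyRange (row_begin - 1) row_end 1).map (pvRowMod (pvSorted data col))).count k : Nat) : Int) 2 ≠ 0) from rfl]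
  rw [pv_oddfold_eq_xorAll,
    pv_go_eq_xorAll (pvSorted data col) row_end (row_end - (row_begin - 1)).toNat (row_begin - 1) rfl]

-- ===== VERDICT (by name: the statement is the Claim_ definition above) =====
theorem solution_spec : Claim_equal_solution := by
  intro data col row_begin row_end _ _
  unfold Spec_solution
  exact pv_solution_eq data col row_begin row_end
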